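-- pv_equiv track=rewrite | github.com/egalli64/pythonesque | ce/c043.py | solution
-- ===== SOURCE A (Python) =====
-- def solution(line):
--     size, *data = map(int, line.split())
--     if len(data) != size:
--         return False
--
--     gaps = set()
--     for i in range(1, len(data)):
--         gap = abs(data[i] - data[i-1])
--         if gap in gaps:
--             return False
--         else:
--             gaps.add(gap)
--     for i in range(1, size):
--         if i not in gaps:
--             return False
--     return True
-- ===== SOURCE B (Python) =====
-- def solution(line):
--     size, *data = map(int, line.split())
--     if len(data) != size:
--         return False
--     gaps = sorted(abs(a - b) for a, b in zip(data, data[1:]))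
--     return gaps == list(range(1, size))
-- ===== Notes on version B (the rewrite author's own statement) =====
-- stated objective: alternative
-- what changed: Replaces A's hash-set strategy (incrementally building a gap set with early-exit duplicate rejection, then a membership scan over 1..size-1) by sorting the adjacent-pair gaps (built via zip, no index arithmetic) and comparing the sorted list to list(range(1, size)) for equality.
import Mathlib
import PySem

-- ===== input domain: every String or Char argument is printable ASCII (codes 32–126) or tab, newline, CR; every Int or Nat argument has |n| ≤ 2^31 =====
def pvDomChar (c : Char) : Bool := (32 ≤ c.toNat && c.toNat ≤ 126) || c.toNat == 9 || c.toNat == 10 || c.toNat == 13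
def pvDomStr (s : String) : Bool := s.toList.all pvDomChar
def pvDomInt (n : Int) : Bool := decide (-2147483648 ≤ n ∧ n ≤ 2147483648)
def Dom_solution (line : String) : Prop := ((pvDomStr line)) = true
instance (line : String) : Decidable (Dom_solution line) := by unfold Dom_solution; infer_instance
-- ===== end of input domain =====

-- B replaces A's hash-set strategy (incremental duplicate-rejecting set build + membership
-- scan over 1..size-1) by sorting the zip-built adjacent gaps and comparing the sorted list
-- with list(range(1, size)); objective: alternative (sort-and-compare vs set-based).

-- ===== PORT A =====
-- first loop of A: for i in range(1, len(data)): gap = abs(...); early return False on duplicate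
def solGapLoop (data : List Int) : List Int → PySem.Set Int → Option (PySem.Set Int)
  | [], gaps => some gaps
  | i :: is, gaps =>
    let gap : Int := |PySem.List.pyGetD data i 0 - PySem.List.pyGetD data (i - 1) 0|
    if PySem.Set.contains gaps gap then none
    else solGapLoop data is (PySem.Set.add gaps gap)

def solution (line : String) : Bool :=
  -- size, *data = map(int, line.split()); under Pre_ every token parses, so getD 0 never fires
  match (PySem.Str.split₀ line).map (fun t => (PySem.Int.ofStr? t).getD 0) with
  | [] => false  -- unreachable under Pre_ (A raises ValueError on an empty split)
  | size :: data =>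
    if (data.length : Int) ≠ size then false
    else
      match solGapLoop data (PySem.List.pyRange 1 (data.length : Int) 1) PySem.Set.empty with
      | none => false
      | some gaps => (PySem.List.pyRange 1 size 1).all (fun i => PySem.Set.contains gaps i)

-- ===== PORT B =====
def solution_alt (line : String) : Bool :=
  match (PySem.Str.split₀ line).map (fun t => (PySem.Int.ofStr? t).getD 0) with
  | [] => false  -- unreachable under Pre_
  | size :: data =>
    if (data.length : Int) ≠ size then false
    else
      -- gaps = sorted(abs(a - b) for a, b in zip(data, data[1:]))
      let gaps : List Int :=
        PySem.List.sorted ((data.zip (data.drop 1)).map (fun p => |p.1 - p.2|)) (fun x => x) false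
      -- gaps == list(range(1, size))
      gaps == PySem.List.pyRange 1 size 1

-- ===== PRECONDITION & SPEC =====
-- Pre_ excludes exactly the lines on which A raises: an empty split (unpacking fails)
-- or a token int() rejects (ValueError); B raises on exactly the same lines.
def Pre_solution (line : String) : Prop :=
  PySem.Str.split₀ line ≠ [] ∧ ∀ t ∈ PySem.Str.split₀ line, (PySem.Int.ofStr? t).isSome = true
instance (line : String) : Decidable (Pre_solution line) := by unfold Pre_solution; infer_instance
def pvWitness_solution : String := "3 1 4 2"

def Spec_solution (line : String) (out : Bool) : Prop := out = solution_alt line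
instance (line : String) (out : Bool) : Decidable (Spec_solution line out) := by unfold Spec_solution; infer_instance

-- ===== CLAIM (what is proved, stated in full; the proofs are below) =====
def Claim_equal_solution : Prop := ∀ (line : String), Dom_solution line → Pre_solution line → Spec_solution line (solution line)

-- ===== LEMMAS AND PROOFS =====

-- A's first loop, over the precomputed gap list
def pureLoop : List Int → PySem.Set Int → Option (PySem.Set Int)
  | [], s => some s
  | g :: gs, s => if PySem.Set.contains s g then none else pureLoop gs (PySem.Set.add s g)

lemma solGapLoop_eq (data : List Int) (idxs : List Int) (s : PySem.Set Int) :
    solGapLoop data idxs s =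
      pureLoop (idxs.map (fun i => |PySem.List.pyGetD data i 0 - PySem.List.pyGetD data (i - 1) 0|)) s := by
  induction idxs generalizing s with
  | nil => rfl
  | cons i is ih => simp [solGapLoop, pureLoop, ih]

lemma pureLoop_spec (gs : List Int) (s : PySem.Set Int) (hs : s.Nodup) :
    pureLoop gs s = if (s ++ gs).Nodup then some (s ++ gs) else none := by
  induction gs generalizing s with
  | nil => simp [pureLoop, hs]
  | cons g gs ih =>
    by_cases hg : g ∈ s
    · have hnd : ¬ (s ++ g :: gs).Nodup := fun h =>
        (List.disjoint_of_nodup_append h) hg List.mem_cons_self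
      simp [pureLoop, hg, hnd]
    · have hadd : PySem.Set.add s g = s ++ [g] := PySem.Set.add_of_not_mem hg
      have hnd : (s ++ [g]).Nodup := by
        refine List.Nodup.append hs (List.nodup_singleton g) ?_
        intro a ha hb
        rw [List.mem_singleton] at hb
        exact hg (hb ▸ ha)
      have := ih (s ++ [g]) hnd
      simp only [pureLoop, hadd, this, List.append_assoc, List.singleton_append]
      simp [hg]

-- A's gap list (indexed via range(1, len(data))) is B's gap list (zip of adjacent pairs)
lemma gaps_eq (data : List Int) :
    (PySem.List.pyRange 1 (data.length : Int) 1).map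
        (fun i => |PySem.List.pyGetD data i 0 - PySem.List.pyGetD data (i - 1) 0|)
      = (data.zip (data.drop 1)).map (fun p => |p.1 - p.2|) := by
  apply List.ext_getElem
  · simp [PySem.List.length_pyRange_one]
  · intro k h1 h2
    have hk : k + 1 < data.length := by
      simp [PySem.List.length_pyRange_one] at h1
      omega
    simp only [List.getElem_map, PySem.List.getElem_pyRange_one, List.getElem_zip,
      List.getElem_drop]
    have e1 : (1 : Int) + k = ((k + 1 : Nat) : Int) := by push_cast; ring
    have e2 : ((k + 1 : Nat) : Int) - 1 = ((k : Nat) : Int) := by push_cast; ring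
    rw [e1, e2, PySem.List.pyGetD_natCast, PySem.List.pyGetD_natCast]
    have g1 : data.getD (k + 1) 0 = data[k + 1] := List.getD_eq_getElem data 0 hk
    have g2 : data.getD k 0 = data[k] := List.getD_eq_getElem data 0 (by omega)
    rw [g1, g2, abs_sub_comm]
    simp [Nat.add_comm]

-- the heart: for |gs| = |R| with R strictly increasing,
-- "gs has no duplicates and every element of R is in gs"  =  "sorted(gs) == R"
lemma main_lemma (gs R : List Int) (hlen : gs.length = R.length)
    (hR : R.Pairwise (· < ·)) :
    (decide gs.Nodup && R.all (fun i => PySem.Set.contains gs i)) =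
      (PySem.List.sorted gs (fun x => x) false == R) := by
  have hRnd : R.Nodup := hR.nodup
  rw [Bool.eq_iff_iff]
  simp only [Bool.and_eq_true, decide_eq_true_eq, List.all_eq_true,
    PySem.Set.contains_iff, beq_iff_eq]
  constructor
  · rintro ⟨hnd, hsub⟩
    have hfsub : R.toFinset ⊆ gs.toFinset := by
      intro y hy
      simp only [List.mem_toFinset] at hy ⊢
      exact hsub y hy
    have hcard : gs.toFinset.card ≤ R.toFinset.card := by
      rw [List.toFinset_card_of_nodup hRnd, ← hlen]
      exact List.toFinset_card_le gs
    have hfin : R.toFinset = gs.toFinset := Finset.eq_of_subset_of_card_le hfsub hcard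
    have hperm : R.Perm gs := List.perm_of_nodup_nodup_toFinset_eq hRnd hnd hfin
    exact PySem.List.sorted_eq_of_perm_of_pairwise_lt _ _ _ hperm hR
  · intro hsort
    have hperm : gs.Perm R := by
      rw [← hsort]
      exact (PySem.List.sorted_perm gs (fun x => x) false).symm
    exact ⟨hperm.nodup_iff.mpr hRnd, fun i hi => hperm.mem_iff.mpr hi⟩

-- ===== VERDICT (by name: the statement is the Claim_ definition above) =====
theorem solution_spec : Claim_equal_solution := by
  intro line _ hpre
  unfold Spec_solution
  obtain ⟨hne, _⟩ := hpre
  unfold solution solution_alt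
  cases hnums : (PySem.Str.split₀ line).map (fun t => (PySem.Int.ofStr? t).getD 0) with
  | nil => exact absurd (List.map_eq_nil_iff.mp hnums) hne
  | cons size data =>
    by_cases hsz : (data.length : Int) ≠ size
    · simp [hsz]
    · push Not at hsz
      subst hsz
      simp only [ne_eq, not_true_eq_false, if_false]
      rw [solGapLoop_eq, show (PySem.Set.empty : PySem.Set Int) = [] from rfl,
        pureLoop_spec _ _ List.nodup_nil]
      simp only [List.nil_append, gaps_eq, List.drop_one]
      have hlen : ((data.zip data.tail).map (fun p => |p.1 - p.2|)).length
          = (PySem.List.pyRange 1 (data.length : Int) 1).length := by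
        simp [PySem.List.length_pyRange_one]
      rw [← main_lemma _ _ hlen (PySem.List.pairwise_lt_pyRange_one 1 _)]
      by_cases hnd : ((data.zip data.tail).map (fun p => |p.1 - p.2|)).Nodup <;>
        simp [hnd]
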